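-- pv_equiv track=rewrite | github.com/arieshsieh0402/LeetCode-Practice | 2299_strong_password_checker_II.py | strong_password_checker_2
-- ===== SOURCE A (Python) =====
-- def strong_password_checker_2(password: str) -> bool:
--     n = len(password)
--     if n < 8:
--         return False
--
--     has_lower = False
--     has_upper = False
--     has_digit = False
--     has_special = False
--     special_char = '!@#$%^&*()-+'
--
--     for i in range(n):
--         if i != 0 and password[i] == password[i - 1]:
--             return False
--         if password[i].islower():
--             has_lower = True
--         elif password[i].isupper():
--             has_upper = True
--         elif password[i].isdigit():
--             has_digit = True
--         elif password[i] in special_char: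
--             has_special = True
--
--     return has_lower and has_upper and has_digit and has_special
-- ===== SOURCE B (Python) =====
-- def strong_password_checker_2(password: str) -> bool:
--     if len(password) < 8:
--         return False
--     if any(a == b for a, b in zip(password, password[1:])):
--         return False
--     special_char = '!@#$%^&*()-+'
--     return (any(c.islower() for c in password)
--             and any(c.isupper() for c in password)
--             and any(c.isdigit() for c in password)
--             and any(c in special_char for c in password))
-- ===== Notes on version B (the rewrite author's own statement) =====
-- stated objective: idiomatic
-- what changed: Replaces the single fused index loop with early returns and four elif-chained flags by independent passes: a zip-based adjacency check and four separate any() scans, one per character class.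
import Mathlib
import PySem

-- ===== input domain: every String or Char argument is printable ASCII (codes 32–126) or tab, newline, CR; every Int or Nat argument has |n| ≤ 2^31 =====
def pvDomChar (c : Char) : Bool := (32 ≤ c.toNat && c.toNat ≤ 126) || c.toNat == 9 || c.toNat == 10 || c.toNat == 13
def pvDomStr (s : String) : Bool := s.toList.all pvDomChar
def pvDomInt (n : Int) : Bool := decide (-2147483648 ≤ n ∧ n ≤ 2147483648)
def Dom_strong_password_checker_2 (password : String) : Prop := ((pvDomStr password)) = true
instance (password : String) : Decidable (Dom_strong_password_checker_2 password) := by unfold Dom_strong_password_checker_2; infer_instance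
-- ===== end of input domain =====

-- B replaces A's fused flag-accumulating loop by independent scans (adjacency via zip, one any-scan per class); same cost, more idiomatic.

-- ===== PORT A =====
def pvSpecialA : List Char := "!@#$%^&*()-+".toList

-- A's for-loop over indices, carrying the previous character (none at i = 0) and the four flags.
def pvLoopA : List Char → Option Char → Bool → Bool → Bool → Bool → Bool
  | [], _, l, u, d, s => l && u && d && s
  | c :: rest, prev, l, u, d, s =>
    if prev == some c then false
    else if PySem.Chars.islower c then pvLoopA rest (some c) true u d s
    else if PySem.Chars.isupper c then pvLoopA rest (some c) l true d s
    else if PySem.Chars.isdigit c then pvLoopA rest (some c) l u true s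
    else if pvSpecialA.contains c then pvLoopA rest (some c) l u d true
    else pvLoopA rest (some c) l u d s

def strong_password_checker_2 (password : String) : Bool :=
  let cs := password.toList
  if cs.length < 8 then false
  else pvLoopA cs none false false false false

-- ===== PORT B =====
def pvSpecialB : List Char := "!@#$%^&*()-+".toList

def strong_password_checker_2_alt (password : String) : Bool :=
  let cs := password.toList
  if cs.length < 8 then false
  else if (cs.zip cs.tail).any (fun p => p.1 == p.2) then false
  else cs.any PySem.Chars.islower && cs.any PySem.Chars.isupper
       && cs.any PySem.Chars.isdigit && cs.any pvSpecialB.contains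

-- ===== PRECONDITION & SPEC =====
def Spec_strong_password_checker_2 (password : String) (out : Bool) : Prop := out = strong_password_checker_2_alt password
instance (password : String) (out : Bool) : Decidable (Spec_strong_password_checker_2 password out) := by unfold Spec_strong_password_checker_2; infer_instance

-- ===== CLAIM (what is proved, stated in full; the proofs are below) =====
def Claim_equal_strong_password_checker_2 : Prop := ∀ (password : String), Dom_strong_password_checker_2 password → Spec_strong_password_checker_2 password (strong_password_checker_2 password)

-- ===== LEMMAS AND PROOFS =====

-- the four character classes are pairwise disjoint
theorem pv_low_up (c : Char) : PySem.Chars.islower c = true → PySem.Chars.isupper c = false := by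
  simp [PySem.Chars.islower, PySem.Chars.isupper, Char.le_def, UInt32.le_iff_toNat_le]
  omega

theorem pv_low_dig (c : Char) : PySem.Chars.islower c = true → PySem.Chars.isdigit c = false := by
  simp [PySem.Chars.islower, PySem.Chars.isdigit, Char.le_def, UInt32.le_iff_toNat_le]
  omega

theorem pv_up_dig (c : Char) : PySem.Chars.isupper c = true → PySem.Chars.isdigit c = false := by
  simp [PySem.Chars.isupper, PySem.Chars.isdigit, Char.le_def, UInt32.le_iff_toNat_le]
  omega

theorem pv_sp_classes (c : Char) (h : c ∈ pvSpecialA) :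
    PySem.Chars.islower c = false ∧ PySem.Chars.isupper c = false ∧ PySem.Chars.isdigit c = false := by
  simp [pvSpecialA] at h
  rcases h with h|h|h|h|h|h|h|h|h|h|h|h <;> subst h <;> decide

theorem pv_low_not_sp (c : Char) (hl : PySem.Chars.islower c = true) : ¬ c ∈ pvSpecialA := by
  intro h; exact absurd hl (by simp [(pv_sp_classes c h).1])

theorem pv_up_not_sp (c : Char) (hu : PySem.Chars.isupper c = true) : ¬ c ∈ pvSpecialA := by
  intro h; exact absurd hu (by simp [(pv_sp_classes c h).2.1])

theorem pv_dig_not_sp (c : Char) (hd : PySem.Chars.isdigit c = true) : ¬ c ∈ pvSpecialA := by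
  intro h; exact absurd hd (by simp [(pv_sp_classes c h).2.2])

-- characterisation of A's loop for i ≥ 1
theorem pvLoopA_eq (rest : List Char) (prev : Char) (l u d s : Bool) :
    pvLoopA rest (some prev) l u d s =
      if ((prev :: rest).zip rest).any (fun p => p.1 == p.2) then false
      else (l || rest.any PySem.Chars.islower) && (u || rest.any PySem.Chars.isupper)
           && (d || rest.any PySem.Chars.isdigit) && (s || rest.any pvSpecialA.contains) := by
  induction rest generalizing prev l u d s with
  | nil => simp [pvLoopA]
  | cons c cs ih =>
    by_cases hpc : prev = c
    · subst hpc
      simp [pvLoopA]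
    · have hne : ((some prev : Option Char) == some c) = false := by simp [hpc]
      have hne' : (prev == c) = false := by simp [hpc]
      by_cases hl : PySem.Chars.islower c = true
      · have hu := pv_low_up c hl
        have hd := pv_low_dig c hl
        have hs := pv_low_not_sp c hl
        simp [pvLoopA, hne, hne', hl, ih, hu, hd, hs]
      · by_cases hu : PySem.Chars.isupper c = true
        · have hd := pv_up_dig c hu
          have hs := pv_up_not_sp c hu
          simp [pvLoopA, hne, hne', hl, hu, ih, hd, hs]
        · by_cases hd : PySem.Chars.isdigit c = true
          · have hs := pv_dig_not_sp c hd
            simp [pvLoopA, hne, hne', hl, hu, hd, ih, hs]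
          · by_cases hs : c ∈ pvSpecialA
            · simp [pvLoopA, hne, hne', hl, hu, hd, hs, ih]
            · simp [pvLoopA, hne, hne', hl, hu, hd, hs, ih]

-- ===== VERDICT (by name: the statement is the Claim_ definition above) =====
theorem strong_password_checker_2_spec : Claim_equal_strong_password_checker_2 := by
  intro password _
  unfold Spec_strong_password_checker_2 strong_password_checker_2 strong_password_checker_2_alt
  have hlen_eq : password.toList.length = password.length := by simp
  by_cases hlen : password.length < 8
  · simp [hlen]
  · cases hcs : password.toList with
    | nil => rw [hcs] at hlen_eq; simp at hlen_eq; omega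
    | cons c rest =>
      have hspec : pvSpecialB = pvSpecialA := rfl
      by_cases hl : PySem.Chars.islower c = true
      · have hu := pv_low_up c hl
        have hd := pv_low_dig c hl
        have hs := pv_low_not_sp c hl
        simp [pvLoopA, hl, hu, hd, hs, pvLoopA_eq, hspec]
      · by_cases hu : PySem.Chars.isupper c = true
        · have hd := pv_up_dig c hu
          have hs := pv_up_not_sp c hu
          simp [pvLoopA, hl, hu, hd, hs, pvLoopA_eq, hspec]
        · by_cases hd : PySem.Chars.isdigit c = true
          · have hs := pv_dig_not_sp c hd
            simp [pvLoopA, hl, hu, hd, hs, pvLoopA_eq, hspec]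
          · by_cases hs : c ∈ pvSpecialA
            · simp [pvLoopA, hl, hu, hd, hs, pvLoopA_eq, hspec]
            · simp [pvLoopA, hl, hu, hd, hs, pvLoopA_eq, hspec]
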